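-- pv_equiv track=rewrite | github.com/Sniggiho/MATHCOMP479_tr1 | movielens.py | get_edges_for_movie_list
-- ===== SOURCE A (Python) =====
-- def get_edges_for_movie_list(movie_list, edge_list):
--     """Returns the sublist of movie-role edges for movies in the movie_list"""
--     movie_id_set = set()
--     for movie_data in movie_list:
--         movie_id_set.add(movie_data[0])
--
--     my_edge_list = []
--
--     for edge in edge_list:
--         if edge[0] in movie_id_set:
--             my_edge_list.append(edge)
--
--     return my_edge_list
-- ===== SOURCE B (Python) =====
-- def get_edges_for_movie_list(movie_list, edge_list):
--     """Returns the sublist of movie-role edges for movies in the movie_list"""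
--     ids = sorted(movie_data[0] for movie_data in movie_list)
--
--     def present(x):
--         lo, hi = 0, len(ids)
--         while lo < hi:
--             mid = (lo + hi) // 2
--             if ids[mid] < x:
--                 lo = mid + 1
--             elif x < ids[mid]:
--                 hi = mid
--             else:
--                 return True
--         return False
--
--     return [edge for edge in edge_list if present(edge[0])]
-- ===== Notes on version B (the rewrite author's own statement) =====
-- stated objective: alternative
-- what changed: Replaces A's hash-set index with a sorted array of movie ids queried by hand-written binary search per edge: sort-then-binary-search instead of build-set-then-hash-lookup.
import Mathlib
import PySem

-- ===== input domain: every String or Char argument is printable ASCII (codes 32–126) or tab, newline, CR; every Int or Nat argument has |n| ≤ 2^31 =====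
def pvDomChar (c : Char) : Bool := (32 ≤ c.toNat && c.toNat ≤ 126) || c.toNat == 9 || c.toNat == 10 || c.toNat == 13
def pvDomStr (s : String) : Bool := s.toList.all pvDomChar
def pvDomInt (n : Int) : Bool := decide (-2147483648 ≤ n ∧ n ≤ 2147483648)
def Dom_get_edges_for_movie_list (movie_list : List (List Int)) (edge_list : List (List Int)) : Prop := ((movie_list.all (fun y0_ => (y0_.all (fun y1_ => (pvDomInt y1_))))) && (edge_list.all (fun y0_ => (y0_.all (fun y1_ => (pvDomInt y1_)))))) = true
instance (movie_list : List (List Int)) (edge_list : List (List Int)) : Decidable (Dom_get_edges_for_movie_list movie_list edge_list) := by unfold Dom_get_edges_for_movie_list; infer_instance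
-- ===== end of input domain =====

-- B replaces A's hash-set index with a sorted id array queried by binary search per edge
-- (objective: alternative algorithm, similar cost).


-- ===== PORT A =====
-- movie_data[0] / edge[0] ported as PySem.List.pyGet? (none = IndexError); the set holds Option Int.
def get_edges_for_movie_list (movie_list : List (List Int)) (edge_list : List (List Int)) : List (List Int) :=
  let movie_id_set : PySem.Set (Option Int) :=
    movie_list.foldl (fun s movie_data => PySem.Set.add s (PySem.List.pyGet? movie_data 0)) PySem.Set.empty
  edge_list.foldl
    (fun my_edge_list edge =>
      if PySem.Set.contains movie_id_set (PySem.List.pyGet? edge 0) then my_edge_list ++ [edge]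
      else my_edge_list) []

-- ===== PORT B =====
-- l[0] as an Int; the none branch (IndexError in Python) is excluded by Pre_.
def pvHead0 (l : List Int) : Int :=
  match PySem.List.pyGet? l 0 with
  | some v => v
  | none => 0

-- the while-loop of B's `present`, as well-founded recursion on hi - lo
def pvBinSearch (ids : List Int) (x : Int) (lo hi : Nat) : Bool :=
  if _h : lo < hi then
    let mid := (lo + hi) / 2
    if ids.getD mid 0 < x then pvBinSearch ids x (mid + 1) hi
    else if x < ids.getD mid 0 then pvBinSearch ids x lo mid
    else true
  else false
termination_by hi - lo
decreasing_by all_goals omega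

def get_edges_for_movie_list_alt (movie_list : List (List Int)) (edge_list : List (List Int)) : List (List Int) :=
  let ids := PySem.List.sorted (movie_list.map (fun movie_data => pvHead0 movie_data)) (fun x => x) false
  edge_list.filter (fun edge => pvBinSearch ids (pvHead0 edge) 0 ids.length)

-- ===== PRECONDITION & SPEC =====
-- Pre_ excludes exactly the inputs on which Python A raises IndexError: an empty inner list
-- (movie_data[0] or edge[0] on []).
def Pre_get_edges_for_movie_list (movie_list : List (List Int)) (edge_list : List (List Int)) : Prop :=
  (∀ m ∈ movie_list, m ≠ []) ∧ (∀ e ∈ edge_list, e ≠ [])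
instance (movie_list : List (List Int)) (edge_list : List (List Int)) : Decidable (Pre_get_edges_for_movie_list movie_list edge_list) := by unfold Pre_get_edges_for_movie_list; infer_instance
def pvWitness_get_edges_for_movie_list : List (List Int) × List (List Int) :=
  ([[1, 9], [3, 8]], [[1, 2], [2, 3], [3, 4], [1, 5]])

def Spec_get_edges_for_movie_list (movie_list : List (List Int)) (edge_list : List (List Int)) (out : List (List Int)) : Prop := out = get_edges_for_movie_list_alt movie_list edge_list
instance (movie_list : List (List Int)) (edge_list : List (List Int)) (out : List (List Int)) : Decidable (Spec_get_edges_for_movie_list movie_list edge_list out) := by unfold Spec_get_edges_for_movie_list; infer_instance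

-- ===== CLAIM (what is proved, stated in full; the proofs are below) =====
def Claim_equal_get_edges_for_movie_list : Prop := ∀ (movie_list : List (List Int)) (edge_list : List (List Int)), Dom_get_edges_for_movie_list movie_list edge_list → Pre_get_edges_for_movie_list movie_list edge_list → Spec_get_edges_for_movie_list movie_list edge_list (get_edges_for_movie_list movie_list edge_list)

-- ===== LEMMAS AND PROOFS =====

theorem pv_contains_add (s : PySem.Set (Option Int)) (y x : Option Int) :
    PySem.Set.contains (PySem.Set.add s y) x = (PySem.Set.contains s x || x == y) := by
  by_cases h : x = y <;> by_cases hs : x ∈ s <;>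
    simp [PySem.Set.contains_eq_listContains, PySem.Set.mem_add, h, hs]

-- membership in the foldl-built id set = an explicit scan of movie_list
theorem pv_set_mem_aux (l : List (List Int)) (s : PySem.Set (Option Int)) (x : Option Int) :
    PySem.Set.contains (l.foldl (fun s movie_data => PySem.Set.add s (PySem.List.pyGet? movie_data 0)) s) x
      = (PySem.Set.contains s x || l.any (fun movie_data => x == PySem.List.pyGet? movie_data 0)) := by
  induction l generalizing s with
  | nil => simp
  | cons m t ih => rw [List.foldl_cons, ih, pv_contains_add, List.any_cons, Bool.or_assoc]

theorem pv_set_mem (movie_list : List (List Int)) (x : Option Int) :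
    PySem.Set.contains
      (movie_list.foldl (fun s movie_data => PySem.Set.add s (PySem.List.pyGet? movie_data 0)) PySem.Set.empty)
      x = movie_list.any (fun movie_data => x == PySem.List.pyGet? movie_data 0) := by
  rw [pv_set_mem_aux]
  simp [PySem.Set.empty]

theorem pv_head0_of_ne_nil (l : List Int) (h : l ≠ []) :
    PySem.List.pyGet? l 0 = some (pvHead0 l) := by
  cases l with
  | nil => exact absurd rfl h
  | cons a t => simp [pvHead0, PySem.List.pyGet?, PySem.List.pyIdx?]

-- binary-search correctness on a ≤-sorted list
theorem pvBinSearch_correct (ids : List Int) (x : Int) (hs : ids.Pairwise (· ≤ ·)) :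
    ∀ (n lo hi : Nat), hi - lo ≤ n → hi ≤ ids.length →
      (pvBinSearch ids x lo hi = true ↔ ∃ i, lo ≤ i ∧ i < hi ∧ ids.getD i 0 = x) := by
  have mono : ∀ (i j : Nat), i ≤ j → j < ids.length → ids.getD i 0 ≤ ids.getD j 0 := by
    intro i j hij hj
    rcases Nat.lt_or_ge i j with h | h
    · have := (List.pairwise_iff_getElem.mp hs) i j (Nat.lt_trans h hj) hj h
      rwa [List.getD_eq_getElem _ _ (Nat.lt_trans h hj), List.getD_eq_getElem _ _ hj]
    · have : i = j := Nat.le_antisymm hij h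
      subst this; exact le_refl _
  intro n
  induction n with
  | zero =>
    intro lo hi hn _
    rw [pvBinSearch]
    have : ¬ lo < hi := by omega
    simp only [this, dif_neg, not_false_iff]
    constructor
    · intro h; exact absurd h (by simp)
    · rintro ⟨i, h1, h2, _⟩; omega
  | succ n ih =>
    intro lo hi hn hlen
    rw [pvBinSearch]
    by_cases hlt : lo < hi
    · simp only [hlt, dif_pos]
      set mid := (lo + hi) / 2 with hmid
      have hmlo : lo ≤ mid := by omega
      have hmhi : mid < hi := by omega
      have hmlen : mid < ids.length := Nat.lt_of_lt_of_le hmhi hlen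
      by_cases h1 : ids.getD mid 0 < x
      · simp only [h1, if_pos]
        rw [ih (mid + 1) hi (by omega) hlen]
        constructor
        · rintro ⟨i, ha, hb, hc⟩; exact ⟨i, by omega, hb, hc⟩
        · rintro ⟨i, ha, hb, hc⟩
          refine ⟨i, ?_, hb, hc⟩
          by_contra hcon
          have hile : i ≤ mid := by omega
          have := mono i mid hile hmlen
          rw [hc] at this
          omega
      · simp only [h1, if_neg, not_false_iff]
        by_cases h2 : x < ids.getD mid 0
        · simp only [h2, if_pos]
          rw [ih lo mid (by omega) (le_of_lt hmlen)]
          constructor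
          · rintro ⟨i, ha, hb, hc⟩; exact ⟨i, ha, by omega, hc⟩
          · rintro ⟨i, ha, hb, hc⟩
            refine ⟨i, ha, ?_, hc⟩
            by_contra hcon
            have : mid ≤ i := by omega
            have hi2 : i < ids.length := by omega
            have := mono mid i this hi2
            rw [hc] at this
            omega
        · simp only [h2, if_neg, not_false_iff]
          constructor
          · intro _
            exact ⟨mid, hmlo, hmhi, by omega⟩
          · intro _; trivial
    · simp only [hlt, dif_neg, not_false_iff]
      constructor
      · intro h; exact absurd h (by simp)
      · rintro ⟨i, h1, h2, _⟩; omega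

theorem pvBinSearch_mem (ids : List Int) (x : Int) (hs : ids.Pairwise (· ≤ ·)) :
    (pvBinSearch ids x 0 ids.length = true ↔ x ∈ ids) := by
  rw [pvBinSearch_correct ids x hs ids.length 0 ids.length (by omega) (le_refl _)]
  constructor
  · rintro ⟨i, _, h2, h3⟩
    rw [List.getD_eq_getElem _ _ h2] at h3
    exact h3 ▸ List.getElem_mem h2
  · intro hmem
    obtain ⟨i, hi, he⟩ := List.mem_iff_getElem.mp hmem
    exact ⟨i, Nat.zero_le _, hi, by rw [List.getD_eq_getElem _ _ hi]; exact he⟩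

-- ===== VERDICT (by name: the statement is the Claim_ definition above) =====
theorem get_edges_for_movie_list_spec : Claim_equal_get_edges_for_movie_list := by
  intro movie_list edge_list _ hpre
  obtain ⟨hm, he⟩ := hpre
  unfold Spec_get_edges_for_movie_list get_edges_for_movie_list get_edges_for_movie_list_alt
  show edge_list.foldl
      (fun my_edge_list edge =>
        if PySem.Set.contains
            (movie_list.foldl (fun s movie_data => PySem.Set.add s (PySem.List.pyGet? movie_data 0)) PySem.Set.empty)
            (PySem.List.pyGet? edge 0) = true then my_edge_list ++ [edge] else my_edge_list) []
    = _
  rw [PySem.List.foldl_append_if_eq_filter]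
  apply List.filter_congr
  intro e hein
  have hene : e ≠ [] := he e hein
  set ids := PySem.List.sorted (movie_list.map (fun movie_data => pvHead0 movie_data)) (fun x => x) false with hids
  have hsorted : ids.Pairwise (· ≤ ·) :=
    (PySem.List.sorted_pairwise (movie_list.map (fun movie_data => pvHead0 movie_data)) (fun x => x)).imp (fun h => h)
  rw [pv_set_mem, Bool.eq_iff_iff, List.any_eq_true, pvBinSearch_mem ids (pvHead0 e) hsorted]
  rw [hids, PySem.List.mem_sorted]
  constructor
  · rintro ⟨m, hmin, hbeq⟩
    rw [pv_head0_of_ne_nil e hene, pv_head0_of_ne_nil m (hm m hmin)] at hbeq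
    simp only [beq_iff_eq, Option.some.injEq] at hbeq
    rw [List.mem_map]
    exact ⟨m, hmin, hbeq.symm⟩
  · intro hmem
    obtain ⟨m, hmin, hval⟩ := List.mem_map.mp hmem
    refine ⟨m, hmin, ?_⟩
    rw [pv_head0_of_ne_nil e hene, pv_head0_of_ne_nil m (hm m hmin)]
    simp [hval]
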